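-- pv_equiv track=rewrite | github.com/acrual/repotron | matrices/mayorModa2.py | calcularMayorVeces
-- ===== SOURCE A (Python) =====
-- def calcularMayorVeces(lista):
--     mayor = lista[0]
--     contMayor = 1
--     for i in range(1, len(lista)):
--         if lista[i] > mayor:
--             mayor = lista[i]
--             contMayor = 1
--         elif lista[i] == mayor:
--             contMayor = contMayor + 1
--     return mayor,contMayor
-- ===== SOURCE B (Python) =====
-- def calcularMayorVeces(lista):
--     s = sorted(lista)
--     mayor = s[-1]
--     return mayor, s.count(mayor)
-- ===== Notes on version B (the rewrite author's own statement) =====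
-- stated objective: simpler
-- what changed: Replaces the fused linear scan that tracks a running maximum and resets a counter with a sort-then-read shape: sort the list, take the last element as the maximum, and count its occurrences with list.count.
import Mathlib
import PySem

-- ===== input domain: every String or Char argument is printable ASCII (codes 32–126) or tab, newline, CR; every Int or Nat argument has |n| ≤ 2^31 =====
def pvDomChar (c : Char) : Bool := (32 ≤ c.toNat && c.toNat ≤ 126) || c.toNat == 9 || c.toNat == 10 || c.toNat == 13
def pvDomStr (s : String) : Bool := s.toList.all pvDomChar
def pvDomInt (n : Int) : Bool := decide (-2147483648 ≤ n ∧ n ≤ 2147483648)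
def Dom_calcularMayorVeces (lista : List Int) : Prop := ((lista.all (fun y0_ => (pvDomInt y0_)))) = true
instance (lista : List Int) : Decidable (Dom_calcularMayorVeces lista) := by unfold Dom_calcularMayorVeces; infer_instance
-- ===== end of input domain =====

-- B replaces A's fused scan (running maximum + reset counter) by sort-then-read: sort, take
-- the last element as the maximum, count it with list.count — simpler, same return values.


-- ===== PORT A =====
def calcularMayorVeces (lista : List Int) : Int × Int :=
  let mayor := PySem.List.pyGetD lista 0 0     -- lista[0]; in range under Pre_
  (PySem.List.pyRange 1 (lista.length : Int) 1).foldl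
    (fun s i =>
      if PySem.List.pyGetD lista i 0 > s.1 then (PySem.List.pyGetD lista i 0, 1)
      else if PySem.List.pyGetD lista i 0 = s.1 then (s.1, s.2 + 1)
      else s)
    (mayor, 1)

-- ===== PORT B =====
def calcularMayorVeces_alt (lista : List Int) : Int × Int :=
  let s := PySem.List.sorted lista (fun x => x)
  let mayor := PySem.List.pyGetD s (-1) 0      -- s[-1]; in range under Pre_
  (mayor, (PySem.List.count s mayor : Int))

-- ===== PRECONDITION & SPEC =====
-- Pre_ excludes only the empty list, on which A raises IndexError (lista[0]).
def Pre_calcularMayorVeces (lista : List Int) : Prop := lista ≠ []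
instance (lista : List Int) : Decidable (Pre_calcularMayorVeces lista) := by unfold Pre_calcularMayorVeces; infer_instance
def pvWitness_calcularMayorVeces : List Int := [1, 3, 3, 2]

def Spec_calcularMayorVeces (lista : List Int) (out : Int × Int) : Prop := out = calcularMayorVeces_alt lista
instance (lista : List Int) (out : Int × Int) : Decidable (Spec_calcularMayorVeces lista out) := by unfold Spec_calcularMayorVeces; infer_instance

-- ===== CLAIM (what is proved, stated in full; the proofs are below) =====
def Claim_equal_calcularMayorVeces : Prop := ∀ (lista : List Int), Dom_calcularMayorVeces lista → Pre_calcularMayorVeces lista → Spec_calcularMayorVeces lista (calcularMayorVeces lista)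

-- ===== LEMMAS AND PROOFS =====

-- the loop body of A as a function of the fetched element
def pvStep (s : Int × Int) (x : Int) : Int × Int :=
  if x > s.1 then (x, 1) else if x = s.1 then (s.1, s.2 + 1) else s

lemma le_foldl_max (t : List Int) : ∀ m : Int, m ≤ t.foldl max m := by
  induction t with
  | nil => intro m; simp
  | cons x t ih => intro m; exact le_trans (le_max_left m x) (ih (max m x))

lemma mem_le_foldl_max (t : List Int) : ∀ m y : Int, y ∈ t → y ≤ t.foldl max m := by
  induction t with
  | nil => intro m y h; cases h
  | cons x t ih =>
    intro m y h
    rcases List.mem_cons.mp h with rfl | h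
    · exact le_trans (le_max_right m y) (le_foldl_max t (max m y))
    · exact ih (max m x) y h

lemma foldl_max_mem (t : List Int) : ∀ m : Int, t.foldl max m = m ∨ t.foldl max m ∈ t := by
  induction t with
  | nil => intro m; left; rfl
  | cons x t ih =>
    intro m
    rcases ih (max m x) with h | h
    · rcases max_choice m x with hm | hm
      · left; simpa [hm] using h
      · rw [hm] at h
        right
        rw [List.foldl_cons, hm, h]
        exact List.mem_cons_self
    · right; exact List.mem_cons_of_mem _ h

-- A's fold computes (max, count of the max seen so far)
lemma fold_pvStep (t : List Int) : ∀ m c : Int,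
    t.foldl pvStep (m, c) =
      (t.foldl max m,
       (if t.foldl max m = m then c else 0) + (t.count (t.foldl max m) : Int)) := by
  induction t with
  | nil => intro m c; simp
  | cons x t ih =>
    intro m c
    rw [List.foldl_cons, List.foldl_cons]
    by_cases hgt : x > m
    · have hmax : max m x = x := max_eq_right (le_of_lt hgt)
      have hM := le_foldl_max t x
      have hstep : pvStep (m, c) x = (x, 1) := by simp [pvStep, hgt]
      rw [hstep, ih x 1, hmax]
      have hMm : t.foldl max x ≠ m := by intro h; omega
      rw [if_neg hMm, List.count_cons]
      refine Prod.ext rfl ?_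
      by_cases hx : t.foldl max x = x
      · rw [if_pos hx, hx, if_pos (show (x == x) = true by simp)]
        push_cast; omega
      · rw [if_neg hx, if_neg (show ¬ (x == t.foldl max x) = true by
          simp only [beq_iff_eq]; exact fun h => hx h.symm)]
        push_cast; omega
    · by_cases heq : x = m
      · subst heq
        have hstep : pvStep (x, c) x = (x, c + 1) := by simp [pvStep]
        rw [hstep, ih x (c + 1), max_self x, List.count_cons]
        refine Prod.ext rfl ?_
        by_cases hx : t.foldl max x = x
        · rw [if_pos hx, if_pos hx, hx, if_pos (show (x == x) = true by simp)]
          push_cast; omega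
        · rw [if_neg hx, if_neg hx, if_neg (show ¬ (x == t.foldl max x) = true by
            simp only [beq_iff_eq]; exact fun h => hx h.symm)]
          push_cast; omega
      · have hlt : x < m := lt_of_le_of_ne (le_of_not_gt hgt) heq
        have hmax : max m x = m := max_eq_left (le_of_lt hlt)
        have hM := le_foldl_max t m
        have hstep : pvStep (m, c) x = (m, c) := by simp [pvStep, hgt, heq]
        rw [hstep, ih m c, hmax, List.count_cons,
          if_neg (show ¬ (x == t.foldl max m) = true by
            simp only [beq_iff_eq]; intro h; omega)]
        refine Prod.ext rfl ?_
        push_cast; omega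

lemma pairwise_le_getLast (l : List Int) (h : l ≠ []) (hp : l.Pairwise (· ≤ ·)) :
    ∀ y ∈ l, y ≤ l.getLast h := by
  induction l with
  | nil => cases h rfl
  | cons x t ih =>
    intro y hy
    cases t with
    | nil =>
      rcases List.mem_cons.mp hy with rfl | hy'
      · simp
      · cases hy'
    | cons z t' =>
      have ht : (z :: t') ≠ [] := by simp
      rw [List.getLast_cons ht]
      rcases List.mem_cons.mp hy with rfl | hy'
      · exact le_trans ((List.pairwise_cons.mp hp).1 _ (List.getLast_mem ht))
          (le_refl _)
      · exact ih ht (List.pairwise_cons.mp hp).2 y hy'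

-- the last element of sorted lista is the maximum computed by A
lemma getLast_sorted_eq (a : Int) (t : List Int)
    (hs : PySem.List.sorted (a :: t) (fun x => x) ≠ []) :
    (PySem.List.sorted (a :: t) (fun x => x)).getLast hs = t.foldl max a := by
  have hperm : (PySem.List.sorted (a :: t) (fun x => x)).Perm (a :: t) :=
    PySem.List.sorted_perm _ _ _
  have hpw : (PySem.List.sorted (a :: t) (fun x => x)).Pairwise (· ≤ ·) :=
    PySem.List.sorted_pairwise (a :: t) (fun x => x)
  have hLmem : (PySem.List.sorted (a :: t) (fun x => x)).getLast hs ∈ (a :: t) :=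
    hperm.mem_iff.mp (List.getLast_mem hs)
  have hLle : (PySem.List.sorted (a :: t) (fun x => x)).getLast hs ≤ t.foldl max a := by
    rcases List.mem_cons.mp hLmem with hEq | h
    · rw [hEq]; exact le_foldl_max t a
    · exact mem_le_foldl_max t a _ h
  have hMmem : t.foldl max a ∈ PySem.List.sorted (a :: t) (fun x => x) := by
    apply hperm.mem_iff.mpr
    rcases foldl_max_mem t a with h | h
    · rw [h]; exact List.mem_cons_self
    · exact List.mem_cons_of_mem _ h
  have hMle : t.foldl max a ≤ (PySem.List.sorted (a :: t) (fun x => x)).getLast hs :=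
    pairwise_le_getLast _ hs hpw _ hMmem
  exact le_antisymm hLle hMle

theorem calcularMayorVeces_spec_aux (lista : List Int)
    (hpre : Pre_calcularMayorVeces lista) :
    calcularMayorVeces lista = calcularMayorVeces_alt lista := by
  obtain ⟨a, t, rfl⟩ := List.exists_cons_of_ne_nil hpre
  -- A side
  have hA : calcularMayorVeces (a :: t) = (a :: t).tail.foldl pvStep (a, 1) := by
    unfold calcularMayorVeces
    have h := PySem.List.foldl_pyRange_pyGetD' (a :: t) 0 pvStep
      (PySem.List.pyGetD (a :: t) 0 0, 1) (a := 1) (by norm_num)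
    simp only [PySem.List.pyGetD_zero_cons] at h ⊢
    simpa [pvStep, List.drop_one] using h
  rw [hA, List.tail_cons, fold_pvStep t a 1]
  -- B side
  rw [show calcularMayorVeces_alt (a :: t) =
      (PySem.List.pyGetD (PySem.List.sorted (a :: t) (fun x => x)) (-1) 0,
       ((PySem.List.count (PySem.List.sorted (a :: t) (fun x => x))
          (PySem.List.pyGetD (PySem.List.sorted (a :: t) (fun x => x)) (-1) 0) : Nat) : Int))
    from rfl]
  have hs : PySem.List.sorted (a :: t) (fun x => x) ≠ [] := by
    simp [PySem.List.sorted_eq_nil_iff]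
  have hperm : (PySem.List.sorted (a :: t) (fun x => x)).Perm (a :: t) :=
    PySem.List.sorted_perm _ _ _
  rw [PySem.List.pyGetD_neg_one _ _ hs, getLast_sorted_eq a t hs]
  have hcount : PySem.List.count (PySem.List.sorted (a :: t) (fun x => x)) (t.foldl max a)
      = (a :: t).count (t.foldl max a) := by
    simpa [PySem.List.count] using hperm.count_eq (t.foldl max a)
  rw [hcount]
  -- compare the counts
  refine Prod.ext rfl ?_
  simp only [List.count_cons]
  by_cases hMa : t.foldl max a = a
  · rw [if_pos hMa, if_pos (show (a == t.foldl max a) = true by simp [hMa])]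
    push_cast; ring
  · rw [if_neg hMa,
      if_neg (show ¬ (a == t.foldl max a) = true by
        simp only [beq_iff_eq]; exact fun h => hMa h.symm)]
    push_cast; ring

-- ===== VERDICT (by name: the statement is the Claim_ definition above) =====
theorem calcularMayorVeces_spec : Claim_equal_calcularMayorVeces := by
  intro lista _ hpre
  exact calcularMayorVeces_spec_aux lista hpre
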